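-- pv_equiv track=rewrite | github.com/andromeda7063/homework | python/da2/q3.py | findNo
-- ===== SOURCE A (Python) =====
-- def findNo(list):
--
--     ll = 0
--     ul = len(list) - 1
--
--     while ll <= ul:
--         mid = (ll + ul) // 2
--
--         if list[mid] == mid + 1:
--             ll = mid + 1
--
--         else:
--             ul = mid - 1
--
--     return ll + 1
-- ===== SOURCE B (Python) =====
-- def findNo(list):
--     def go(lo, n):
--         # n = number of elements still under consideration, starting at lo
--         if n == 0:
--             return lo + 1
--         k = (n - 1) // 2
--         if list[lo + k] == lo + k + 1:
--             return go(lo + k + 1, n - 1 - k)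
--         return go(lo, k)
--     return go(0, len(list))
-- ===== Notes on version B (the rewrite author's own statement) =====
-- stated objective: alternative
-- what changed: The imperative while-loop over mutable lower/upper bounds (ll, ul) is replaced by a recursive helper over (offset, remaining count) that halves the count with Nat-style division, eliminating both mutable bounds and the signed midpoint arithmetic.
import Mathlib
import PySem

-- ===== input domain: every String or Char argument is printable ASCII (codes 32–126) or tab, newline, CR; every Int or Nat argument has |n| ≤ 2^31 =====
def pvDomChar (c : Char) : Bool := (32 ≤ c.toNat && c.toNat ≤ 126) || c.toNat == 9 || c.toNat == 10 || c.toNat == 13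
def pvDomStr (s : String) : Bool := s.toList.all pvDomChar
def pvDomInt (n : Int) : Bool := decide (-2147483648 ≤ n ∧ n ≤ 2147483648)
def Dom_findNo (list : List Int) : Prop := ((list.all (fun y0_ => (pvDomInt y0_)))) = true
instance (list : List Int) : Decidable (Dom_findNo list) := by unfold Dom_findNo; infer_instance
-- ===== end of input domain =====

-- B replaces A's imperative two-bound (ll, ul) while-loop by a recursive helper over (offset, remaining size) with Nat halving; same result, no mutable bounds.


-- ===== PORT A =====
-- A's while-loop over mutable ll/ul, as recursion on the interval width
def findNoLoop (list : List Int) (ll ul : Int) : Int :=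
  if h : ll ≤ ul then
    let mid := PySem.Int.floordiv (ll + ul) 2
    if PySem.List.pyGet? list mid = some (mid + 1) then
      findNoLoop list (mid + 1) ul
    else
      findNoLoop list ll (mid - 1)
  else ll
termination_by (ul + 1 - ll).toNat
decreasing_by
  · have := PySem.Int.floordiv_two_mid_bounds h
    omega
  · have := PySem.Int.floordiv_two_mid_bounds h
    omega

def findNo (list : List Int) : Int :=
  findNoLoop list 0 ((list.length : Int) - 1) + 1

-- ===== PORT B =====
-- B's go(lo, n): n remaining elements from offset lo; n is a count, halved by Nat division
def findNoGo (list : List Int) (lo : Int) (n : Nat) : Int :=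
  match n with
  | 0 => lo + 1
  | Nat.succ m =>
    let k := m / 2
    if PySem.List.pyGet? list (lo + (k : Int)) = some (lo + (k : Int) + 1) then
      findNoGo list (lo + (k : Int) + 1) (m - k)
    else
      findNoGo list lo k
termination_by n
decreasing_by
  · omega
  · omega

def findNo_alt (list : List Int) : Int :=
  findNoGo list 0 list.length

-- ===== PRECONDITION & SPEC =====
def Spec_findNo (list : List Int) (out : Int) : Prop := out = findNo_alt list
instance (list : List Int) (out : Int) : Decidable (Spec_findNo list out) := by unfold Spec_findNo; infer_instance

-- ===== CLAIM (what is proved, stated in full; the proofs are below) =====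
def Claim_equal_findNo : Prop := ∀ (list : List Int), Dom_findNo list → Spec_findNo list (findNo list)

-- ===== LEMMAS AND PROOFS =====
theorem findNoGo_eq (list : List Int) (lo : Int) (n : Nat) :
    findNoGo list lo n = findNoLoop list lo (lo + n - 1) + 1 := by
  fun_induction findNoGo list lo n with
  | case1 lo =>
    rw [findNoLoop]
    simp only [dif_neg (by omega : ¬ lo ≤ lo + (0 : Nat) - 1)]
  | case2 lo m k hb ih =>
    rw [findNoLoop]
    have hmid : PySem.Int.floordiv (lo + (lo + (m + 1 : Nat) - 1)) 2 = lo + (k : Int) := by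
      rw [PySem.Int.floordiv_eq_ediv_of_pos (by omega)]
      simp only [k]
      omega
    rw [dif_pos (by omega : lo ≤ lo + ((m + 1 : Nat) : Int) - 1)]
    simp only [hmid, hb, if_pos]
    rw [ih]
    congr 2
    have : k ≤ m := by omega
    push_cast [this]
    ring
  | case3 lo m k hb ih =>
    rw [findNoLoop]
    have hmid : PySem.Int.floordiv (lo + (lo + (m + 1 : Nat) - 1)) 2 = lo + (k : Int) := by
      rw [PySem.Int.floordiv_eq_ediv_of_pos (by omega)]
      simp only [k]
      omega
    rw [dif_pos (by omega : lo ≤ lo + ((m + 1 : Nat) : Int) - 1)]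
    simp only [hmid, hb, if_false]
    exact ih

-- ===== VERDICT (by name: the statement is the Claim_ definition above) =====
theorem findNo_spec : Claim_equal_findNo := by
  intro list _
  unfold Spec_findNo findNo findNo_alt
  rw [findNoGo_eq]
  congr 2
  omega
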